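-- pv_equiv track=rewrite | github.com/lucweytingh/datavis19 | tomatoes_national.py | sort_dates
-- ===== SOURCE A (Python) =====
-- def sort_dates(dates):
--     if dates == []: return []
--     else:
--         result = [dates[0]]
--         del(dates[0])
--         while dates != []:
--             for i in range(len(result)):
--                 if dates[0][0][1] < result[i][0][1]:
--                     result.insert(i, dates[0])
--                     del(dates[0])
--                     break
--                 elif dates[0][0][1] == result[i][0][1]:
--                     if dates[0][0][0] < result[i][0][0]:
--                         result.insert(i, dates[0])
--                         del(dates[0])
--                         break
--                 if i == len(result) - 1:
--                     result.append(dates[0])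
--                     del(dates[0])
--         return result
-- ===== SOURCE B (Python) =====
-- # B: idiomatic re-implementation using Python's built-in stable sort with a tuple key.
-- # Return-value equivalence only: A empties its argument list in place; B leaves it unchanged.
-- def sort_dates(dates):
--     return sorted(dates, key=lambda x: (x[0][1], x[0][0]))
-- ===== Notes on version B (the rewrite author's own statement) =====
-- stated objective: idiomatic
-- what changed: A's hand-written insertion sort (repeatedly scanning the sorted prefix and inserting) is replaced by one call to Python's built-in stable sorted() with the composite key (x[0][1], x[0][0]); A also empties its argument in place while B leaves it unchanged (return-value equivalence).
-- outside the precondition, e.g. on sort_dates([[[]]]): A returns [[[]]], B raises IndexError; on sort_dates([[[5]]]): A returns [[[5]]], B raises IndexError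
import Mathlib
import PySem

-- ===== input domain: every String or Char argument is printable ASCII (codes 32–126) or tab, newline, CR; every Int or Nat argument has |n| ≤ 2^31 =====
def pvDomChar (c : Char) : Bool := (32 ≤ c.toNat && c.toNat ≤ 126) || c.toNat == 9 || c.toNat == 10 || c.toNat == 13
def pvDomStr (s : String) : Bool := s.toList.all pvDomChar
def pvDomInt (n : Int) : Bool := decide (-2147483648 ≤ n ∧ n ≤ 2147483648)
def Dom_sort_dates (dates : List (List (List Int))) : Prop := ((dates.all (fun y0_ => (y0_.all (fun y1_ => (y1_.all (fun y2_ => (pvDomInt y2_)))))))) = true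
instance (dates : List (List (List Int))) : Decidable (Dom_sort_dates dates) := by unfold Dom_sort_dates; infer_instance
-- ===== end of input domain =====

-- B replaces A's hand-written insertion sort with one call to the built-in stable sort
-- keyed by (x[0][1], x[0][0]); return-value equivalence only (A empties its argument in
-- place, B leaves it unchanged).

-- ===== PORT A =====
-- d[0][1] and d[0][0], exactly the index expressions both Pythons evaluate (in range on Pre_)
def pvKey1 (d : List (List Int)) : Int := PySem.List.pyGetD (PySem.List.pyGetD d 0 []) 1 0
def pvKey0 (d : List (List Int)) : Int := PySem.List.pyGetD (PySem.List.pyGetD d 0 []) 0 0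

-- A's inner `for i in range(len(result))` over the sorted prefix: insert dates[0] before the
-- first result[i] with a strictly greater composite key, else (i == len(result)-1) append.
def pvInsA (x : List (List Int)) : List (List (List Int)) → List (List (List Int))
  | [] => [x]
  | r :: rest =>
    if pvKey1 x < pvKey1 r then x :: r :: rest
    else if pvKey1 x = pvKey1 r then
      (if pvKey0 x < pvKey0 r then x :: r :: rest else r :: pvInsA x rest)
    else r :: pvInsA x rest

-- A's outer `while dates != []`, consuming dates one head at a time
def pvWhileA : List (List (List Int)) → List (List (List Int)) → List (List (List Int))
  | [], result => result
  | x :: xs, result => pvWhileA xs (pvInsA x result)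

def sort_dates (dates : List (List (List Int))) : List (List (List Int)) :=
  match dates with
  | [] => []
  | d :: rest => pvWhileA rest [d]

-- ===== PORT B =====
def sort_dates_alt (dates : List (List (List Int))) : List (List (List Int)) :=
  PySem.List.sorted2 dates pvKey1 pvKey0

-- ===== PRECONDITION & SPEC =====
-- Pre_ excludes lists containing a d with d == [] or len(d[0]) < 2: evaluating the key
-- d[0][1] raises IndexError there — A raises whenever len(dates) >= 2, and on a singleton
-- list A returns it unexamined only because no comparison ever runs, while B's key
-- extraction raises on that singleton too.
def Pre_sort_dates (dates : List (List (List Int))) : Prop :=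
  ∀ d ∈ dates, d ≠ [] ∧ 2 ≤ (d.headD []).length
instance (dates : List (List (List Int))) : Decidable (Pre_sort_dates dates) := by
  unfold Pre_sort_dates; infer_instance

def pvWitness_sort_dates : List (List (List Int)) := [[[1, 2]], [[3, 0]], [[-1, 2]]]

def Spec_sort_dates (dates : List (List (List Int))) (out : List (List (List Int))) : Prop := out = sort_dates_alt dates
instance (dates : List (List (List Int))) (out : List (List (List Int))) : Decidable (Spec_sort_dates dates out) := by unfold Spec_sort_dates; infer_instance

-- ===== CLAIM (what is proved, stated in full; the proofs are below) =====
def Claim_equal_sort_dates : Prop := ∀ (dates : List (List (List Int))), Dom_sort_dates dates → Pre_sort_dates dates → Spec_sort_dates dates (sort_dates dates)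

-- ===== LEMMAS AND PROOFS =====

-- the comparison `before` that sorted2 uses for the tuple key (pvKey1 x, pvKey0 x)
def pvBefore (a b : List (List Int)) : Bool :=
  decide (pvKey1 a < pvKey1 b) || (!decide (pvKey1 b < pvKey1 a) && decide (pvKey0 a < pvKey0 b))

theorem pvInsA_eq_insertBy (x : List (List Int)) (acc : List (List (List Int))) :
    pvInsA x acc = PySem.List.insertBy pvBefore x acc := by
  induction acc with
  | nil => simp [pvInsA, PySem.List.insertBy]
  | cons r rest ih =>
    simp only [pvInsA, PySem.List.insertBy, pvBefore]
    by_cases h1 : pvKey1 x < pvKey1 r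
    · simp [h1]
    · by_cases h2 : pvKey1 x = pvKey1 r
      · by_cases h3 : pvKey0 x < pvKey0 r
        · simp [h2, h3]
        · simp [h2, h3, ih]
      · have h4 : pvKey1 r < pvKey1 x := by omega
        simp [h1, h2, h4, ih]

theorem pvWhileA_eq_foldl (xs result : List (List (List Int))) :
    pvWhileA xs result = xs.foldl (fun acc x => PySem.List.insertBy pvBefore x acc) result := by
  induction xs generalizing result with
  | nil => rfl
  | cons x xs ih => simp [pvWhileA, ih, pvInsA_eq_insertBy]

theorem sorted2_eq_foldl (dates : List (List (List Int))) :
    sort_dates_alt dates = dates.foldl (fun acc x => PySem.List.insertBy pvBefore x acc) [] := by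
  rfl

-- ===== VERDICT (by name: the statement is the Claim_ definition above) =====
theorem sort_dates_spec : Claim_equal_sort_dates := by
  intro dates _ _
  unfold Spec_sort_dates
  rw [sorted2_eq_foldl]
  match dates with
  | [] => rfl
  | d :: rest =>
    simp only [sort_dates, List.foldl_cons]
    rw [pvWhileA_eq_foldl]
    rfl
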